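-- pv_equiv track=rewrite | github.com/magnetenstad/lazex | lib.py | pad_symbols
-- ===== SOURCE A (Python) =====
-- def string_insert(string, index, substring):
--     return string[:index] + substring + string[index:]
--
-- def depth_add(char):
--     return (char in ("(", "{", "[")) - (char in (")", "}", "]"))
--
-- def pad_symbols(string):
--     symbols = ("!", "=", "+", "-", "*", "/", ">", "<")
--     i, depth = 0, 0
--     while i < len(string):
--         depth += depth_add(string[i])
--         if (depth == 0) and (string[i] in symbols):
--             if (string[i] != "=") or (string[i - 1] in symbols):
--                 string = string_insert(string, i, " ")
--                 i += 1
--             if string[i + 1] != "=":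
--                 string = string_insert(string, i + 1, " ")
--         i += 1
--     return string
-- ===== SOURCE B (Python) =====
-- def pad_symbols(string):
--     symbols = "!=+-*/><"
--     out = []
--     depth = 0
--     prev_sym = False
--     chars = list(string)
--     n = len(chars)
--     for i, c in enumerate(chars):
--         nxt = chars[i + 1] if i + 1 < n else None
--         if c in "({[":
--             depth += 1
--         elif c in ")}]":
--             depth -= 1
--         if depth == 0 and c in symbols:
--             if c != "=" or prev_sym:
--                 out.append(" ")
--             out.append(c)
--             if nxt != "=":
--                 out.append(" ")
--         else:
--             out.append(c)
--         prev_sym = c in symbols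
--     return "".join(out)
-- ===== Notes on version B (the rewrite author's own statement) =====
-- stated objective: faster
-- what changed: A repeatedly rebuilds the whole string with string_insert inside its scan (quadratic); B makes a single pass over the original characters, tracking bracket depth, a prev-is-symbol flag and a one-char lookahead, appending pieces to an output list joined once at the end.
-- intended difference: On strings whose first character is '=' and whose last character is an operator symbol, A's negative-index wraparound (string[i-1] with i=0 reads the LAST character) makes it pad a space before the leading '='; B treats a leading '=' as having no previous symbol and emits no such space, which is the intended reading of the prev-character check. — e.g. on pad_symbols("=(+"): A returns " = (+", B returns "= (+"
-- outside the precondition, e.g. on pad_symbols('='): A raises IndexError, B returns '= '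
import Mathlib
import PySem

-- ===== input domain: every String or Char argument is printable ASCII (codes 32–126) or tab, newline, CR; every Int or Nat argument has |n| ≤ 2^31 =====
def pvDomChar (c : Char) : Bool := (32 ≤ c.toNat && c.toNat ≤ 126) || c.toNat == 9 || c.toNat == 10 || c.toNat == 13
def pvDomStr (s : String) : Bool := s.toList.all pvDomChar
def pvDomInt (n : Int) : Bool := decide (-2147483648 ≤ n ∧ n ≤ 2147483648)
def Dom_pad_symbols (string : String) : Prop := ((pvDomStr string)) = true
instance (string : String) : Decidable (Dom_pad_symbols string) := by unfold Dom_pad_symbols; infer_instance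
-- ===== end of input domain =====

-- B replaces A's quadratic rebuild-the-string-per-insert scan by one linear pass that appends
-- output pieces to a list (objective: faster, asymptotic). A mutates only its local variable, so
-- only return values are at stake.

-- ===== PORT A =====
-- helpers shared notation: the operator symbols tuple and its membership test
def isSym (c : Char) : Bool :=
  c = '!' || c = '=' || c = '+' || c = '-' || c = '*' || c = '/' || c = '>' || c = '<'

def isSymO (o : Option Char) : Bool := o.elim false isSym

def string_insert (string : List Char) (index : Int) (substring : List Char) : List Char :=
  PySem.List.slice string none (some index) ++ substring ++ PySem.List.slice string (some index) none

def depth_add (c : Char) : Int :=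
  (if c ∈ ['(', '{', '['] then (1 : Int) else 0) - (if c ∈ [')', '}', ']'] then (1 : Int) else 0)

-- A's while-loop on the evolving string; fuel 2*len+1 is enough since each original character
-- causes at most two iterations (itself and a possibly inserted trailing space).
def loopA : Nat → List Char → Nat → Int → List Char
  | 0, s, _, _ => s
  | fuel+1, s, i, depth =>
    if i < s.length then
      let c := s.getD i ' '
      let depth' := depth + depth_add c
      if depth' = 0 ∧ isSym c = true then
        let p : List Char × Nat :=
          if c ≠ '=' ∨ isSymO (PySem.List.pyGet? s ((i : Int) - 1)) = true then
            (string_insert s (i : Int) [' '], i + 1)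
          else (s, i)
        match PySem.List.pyGet? p.1 ((p.2 : Int) + 1) with
        | none => p.1   -- Python raises IndexError here (excluded by Pre_)
        | some ch =>
          loopA fuel (if ch ≠ '=' then string_insert p.1 ((p.2 : Int) + 1) [' '] else p.1)
            (p.2 + 1) depth'
      else loopA fuel s (i + 1) depth'
    else s

def pad_symbols (string : String) : String :=
  String.ofList (loopA (2 * string.toList.length + 1) string.toList 0 0)

-- ===== PORT B =====
-- one pass: depth counter, prev-is-symbol flag, one-char lookahead (rest.head? = chars[i+1] if in range else None)
def loopB : List Char → Int → Bool → List Char → List Char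
  | [], _, _, out => out
  | c :: rest, depth, prevSym, out =>
    let depth' := if c = '(' ∨ c = '{' ∨ c = '[' then depth + 1
                  else if c = ')' ∨ c = '}' ∨ c = ']' then depth - 1 else depth
    let out' :=
      if depth' = 0 ∧ isSym c = true then
        let o1 := if c ≠ '=' ∨ prevSym = true then out ++ [' '] else out
        let o2 := o1 ++ [c]
        if rest.head? ≠ some '=' then o2 ++ [' '] else o2
      else out ++ [c]
    loopB rest depth' (isSym c) out'

def pad_symbols_alt (string : String) : String :=
  String.ofList (loopB string.toList 0 false [])

-- ===== PRECONDITION & SPEC =====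
-- Pre_ excludes exactly the inputs where A raises IndexError: the last character is an operator
-- symbol and the total bracket balance is 0 (then A reads string[i+1] one past the end).
def Pre_pad_symbols (string : String) : Prop :=
  isSymO string.toList.getLast? = true → (string.toList.map depth_add).sum ≠ 0

instance (string : String) : Decidable (Pre_pad_symbols string) := by
  unfold Pre_pad_symbols; infer_instance

def pvWitness_pad_symbols : String := "a+b"

-- On strings starting with '=' and ending with an operator symbol, A's negative-index wraparound
-- (string[i-1] at i=0 reads the LAST character) pads a space before the leading '='; B treats a
-- leading '=' as having no previous symbol, the intended reading of the check.
def D_pad_symbols (string : String) : Prop :=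
  string.toList.head? = some '=' ∧ isSymO string.toList.getLast? = true

instance (string : String) : Decidable (D_pad_symbols string) := by
  unfold D_pad_symbols; infer_instance

def Spec_pad_symbols (string : String) (out : String) : Prop :=
  ¬ D_pad_symbols string → out = pad_symbols_alt string

instance (string : String) (out : String) : Decidable (Spec_pad_symbols string out) := by
  unfold Spec_pad_symbols; infer_instance

def pvDiffWitness_pad_symbols : String := "=(+"
def pvDiffWitnessOut_pad_symbols : String × String := (" = (+", "= (+")

-- ===== CLAIM (what is proved, stated in full; the proofs are below) =====
def Claim_unchanged_pad_symbols : Prop := ∀ (string : String), Dom_pad_symbols string → Pre_pad_symbols string → Spec_pad_symbols string (pad_symbols string)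
def Claim_changed_pad_symbols : Prop := Dom_pad_symbols (pvDiffWitness_pad_symbols) ∧ Pre_pad_symbols (pvDiffWitness_pad_symbols) ∧ D_pad_symbols (pvDiffWitness_pad_symbols) ∧ pad_symbols (pvDiffWitness_pad_symbols) = pvDiffWitnessOut_pad_symbols.1 ∧ pad_symbols_alt (pvDiffWitness_pad_symbols) = pvDiffWitnessOut_pad_symbols.2 ∧ pvDiffWitnessOut_pad_symbols.1 ≠ pvDiffWitnessOut_pad_symbols.2
def Claim_exact_pad_symbols : Prop := ∀ (string : String), Dom_pad_symbols string → Pre_pad_symbols string → D_pad_symbols string → pad_symbols string ≠ pad_symbols_alt string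

-- ===== LEMMAS AND PROOFS =====

lemma depth_add_space : depth_add ' ' = 0 := by decide

lemma isSym_space : isSym ' ' = false := by decide

lemma bdepth_eq (c : Char) (d : Int) :
    (if c = '(' ∨ c = '{' ∨ c = '[' then d + 1
     else if c = ')' ∨ c = '}' ∨ c = ']' then d - 1 else d) = d + depth_add c := by
  unfold depth_add
  simp only [List.mem_cons, List.not_mem_nil, or_false]
  split_ifs with h1 h2 h3
  · exfalso; rcases h1 with h|h|h <;> rcases h2 with h'|h'|h' <;> simp [h] at h'
  all_goals omega

lemma getD_append_self (acc rest : List Char) (c : Char) :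
    (acc ++ c :: rest).getD acc.length ' ' = c := by
  simp [List.getD_eq_getElem?_getD, List.getElem?_append_right (Nat.le_refl acc.length)]

lemma insert_append (acc rest : List Char) :
    string_insert (acc ++ rest) ((acc.length : Nat) : Int) [' '] = acc ++ ' ' :: rest := by
  unfold string_insert
  rw [PySem.List.slice_to_natCast, PySem.List.slice_from_natCast]
  simp [List.take_left, List.drop_left]

lemma pyGet?_at_len (pre ys : List Char) :
    PySem.List.pyGet? (pre ++ ys) ((pre.length : Nat) : Int) = ys.head? := by
  rw [PySem.List.pyGet?_natCast]
  rw [List.getElem?_append_right (Nat.le_refl pre.length)]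
  simp [List.head?_eq_getElem?]

lemma hlast_shift (c : Char) (rest : List Char) (depth : Int)
    (h : isSymO (c :: rest).getLast? = true → depth + ((c :: rest).map depth_add).sum ≠ 0) :
    isSymO rest.getLast? = true → (depth + depth_add c) + (rest.map depth_add).sum ≠ 0 := by
  intro hl
  cases rest with
  | nil => simp [isSymO] at hl
  | cons a as =>
    have h2 := h (by simpa using hl)
    simp only [List.map_cons, List.sum_cons] at h2 ⊢
    omega

lemma loopA_space (f : Nat) (pre rest : List Char) (d : Int) :
    loopA (f + 1) (pre ++ ' ' :: rest) pre.length d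
      = loopA f ((pre ++ [' ']) ++ rest) (pre.length + 1) d := by
  have hlt : pre.length < (pre ++ ' ' :: rest).length := by simp
  rw [loopA, if_pos hlt]
  simp [getD_append_self, depth_add_space, isSym_space]

lemma loopB_prefix (rest : List Char) :
    ∀ (d : Int) (p : Bool) (pref out : List Char),
      loopB rest d p (pref ++ out) = pref ++ loopB rest d p out := by
  induction rest with
  | nil => intro d p pref out; simp [loopB]
  | cons c r ih =>
    intro d p pref out
    simp only [loopB]
    split_ifs <;> simp [ih, List.append_assoc]

/-- Main invariant: running A's loop on `acc ++ rest` with the cursor at `acc.length`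
equals B's loop on `rest` with accumulator `acc`, provided `prevSym` describes the character
A would read at `i-1` whenever it is going to read it (next char is '='), and no top-level
symbol is last (no IndexError). -/
lemma loopA_eq (rest : List Char) :
    ∀ (fuel : Nat) (acc : List Char) (depth : Int) (prevSym : Bool),
      2 * rest.length ≤ fuel →
      (rest.head? = some '=' →
        isSymO (PySem.List.pyGet? (acc ++ rest) ((acc.length : Int) - 1)) = prevSym) →
      (isSymO rest.getLast? = true → depth + (rest.map depth_add).sum ≠ 0) →
      loopA fuel (acc ++ rest) acc.length depth = loopB rest depth prevSym acc := by
  induction rest with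
  | nil =>
    intro fuel acc depth prevSym _ _ _
    cases fuel <;> simp [loopA, loopB]
  | cons c rest' ih =>
    intro fuel acc depth prevSym hfuel hprev hlast
    simp only [List.length_cons] at hfuel
    obtain ⟨f, rfl⟩ : ∃ f, fuel = f + 1 := ⟨fuel - 1, by omega⟩
    have hf1 : 2 * rest'.length + 1 ≤ f := by omega
    have hlt : acc.length < (acc ++ c :: rest').length := by simp
    have hgd : (acc ++ c :: rest').getD acc.length ' ' = c := getD_append_self acc rest' c
    have hiff : ((c ≠ '=' ∨ isSymO (PySem.List.pyGet? (acc ++ c :: rest') ((acc.length : Int) - 1)) = true)) ↔ (c ≠ '=' ∨ prevSym = true) := by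
      by_cases hc : c = '='
      · subst hc
        rw [hprev rfl]
      · simp [hc]
    rw [loopA, loopB]
    rw [if_pos hlt]
    simp only [hgd, bdepth_eq]
    by_cases hcnd : (depth + depth_add c = 0 ∧ isSym c = true)
    · -- c is a top-level symbol
      obtain ⟨f2, rfl⟩ : ∃ f2, f = f2 + 1 := ⟨f - 1, by omega⟩
      rw [if_pos hcnd, if_pos hcnd]
      obtain ⟨hd0, hsym⟩ := hcnd
      by_cases hb : (c ≠ '=' ∨ prevSym = true)
      · rw [if_pos (hiff.mpr hb), if_pos hb]
        rw [insert_append acc (c :: rest')]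
        have e1 : acc ++ ' ' :: c :: rest' = (acc ++ [' ', c]) ++ rest' := by simp
        have e2 : ((acc.length + 1 : Nat) : Int) + 1 = (((acc ++ [' ', c]).length : Nat) : Int) := by
          simp; push_cast; ring
        rw [e1, e2, pyGet?_at_len]
        cases rest' with
        | nil =>
          exfalso
          have h0 := hlast (by simp [isSymO, hsym])
          simp at h0
          omega
        | cons ch rest'' =>
          simp only [List.head?_cons]
          by_cases hch : ch = '='
          · subst hch
            rw [if_neg (by simp), if_neg (by simp)]
            have e3 : acc.length + 1 + 1 = (acc ++ [' ', c]).length := by simp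
            rw [e3, show acc ++ [' '] ++ [c] = acc ++ [' ', c] by simp]
            apply ih _ _ _ _ (by omega)
            · intro _
              have e4 : (((acc ++ [' ', c]).length : Nat) : Int) - 1
                  = (((acc ++ [' ']).length : Nat) : Int) := by simp; push_cast; ring
              rw [e4, show (acc ++ [' ', c]) ++ ('=' :: rest'') = (acc ++ [' ']) ++ (c :: '=' :: rest'') by simp,
                pyGet?_at_len]
              simp [isSymO]
            · exact hlast_shift c ('=' :: rest'') depth hlast
          · rw [if_pos (by simp [hch]), if_pos (by simp [hch])]
            rw [insert_append (acc ++ [' ', c]) (ch :: rest'')]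
            have e3 : acc.length + 1 + 1 = (acc ++ [' ', c]).length := by simp
            rw [e3, loopA_space]
            rw [show ((acc ++ [' ', c]) ++ [' ']) ++ (ch :: rest'') = (acc ++ [' ', c, ' ']) ++ (ch :: rest'') by simp]
            rw [show (acc ++ [' ', c]).length + 1 = (acc ++ [' ', c, ' ']).length by simp]
            rw [show ((acc ++ [' ']) ++ [c]) ++ [' '] = acc ++ [' ', c, ' '] by simp]
            apply ih _ _ _ _ (by omega)
            · intro hh
              simp at hh
              exact absurd hh hch
            · exact hlast_shift c (ch :: rest'') depth hlast
      · rw [if_neg (fun h => hb (hiff.mp h)), if_neg hb]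
        have e1 : acc ++ c :: rest' = (acc ++ [c]) ++ rest' := by simp
        have e2 : ((acc.length : Nat) : Int) + 1 = (((acc ++ [c]).length : Nat) : Int) := by
          simp
        rw [e1, e2, pyGet?_at_len]
        cases rest' with
        | nil =>
          exfalso
          have h0 := hlast (by simp [isSymO, hsym])
          simp at h0
          omega
        | cons ch rest'' =>
          simp only [List.head?_cons]
          by_cases hch : ch = '='
          · subst hch
            rw [if_neg (by simp), if_neg (by simp)]
            rw [show acc.length + 1 = (acc ++ [c]).length by simp]
            apply ih _ _ _ _ (by omega)
            · intro _
              have e4 : (((acc ++ [c]).length : Nat) : Int) - 1 = ((acc.length : Nat) : Int) := by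
                simp
              rw [e4, show (acc ++ [c]) ++ ('=' :: rest'') = acc ++ (c :: '=' :: rest'') by simp,
                pyGet?_at_len]
              simp [isSymO]
            · exact hlast_shift c ('=' :: rest'') depth hlast
          · rw [if_pos (by simp [hch]), if_pos (by simp [hch])]
            rw [insert_append (acc ++ [c]) (ch :: rest'')]
            rw [show acc.length + 1 = (acc ++ [c]).length by simp, loopA_space]
            rw [show ((acc ++ [c]) ++ [' ']) ++ (ch :: rest'') = (acc ++ [c, ' ']) ++ (ch :: rest'') by simp]
            rw [show (acc ++ [c]).length + 1 = (acc ++ [c, ' ']).length by simp]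
            rw [show (acc ++ [c]) ++ [' '] = acc ++ [c, ' '] by simp]
            apply ih _ _ _ _ (by omega)
            · intro hh
              simp at hh
              exact absurd hh hch
            · exact hlast_shift c (ch :: rest'') depth hlast
    · rw [if_neg hcnd, if_neg hcnd]
      have e1 : acc ++ c :: rest' = (acc ++ [c]) ++ rest' := by simp
      have e2 : acc.length + 1 = (acc ++ [c]).length := by simp
      rw [e1, e2]
      apply ih _ _ _ _ (by omega)
      · intro _
        have e4 : (((acc ++ [c]).length : Nat) : Int) - 1 = ((acc.length : Nat) : Int) := by simp
        rw [e4, show (acc ++ [c]) ++ rest' = acc ++ (c :: rest') by simp, pyGet?_at_len]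
        simp [isSymO]
      · exact hlast_shift c rest' depth hlast


/-- First-step analysis inside D_: with a leading '=' whose wraparound read sees a symbol,
A emits one extra leading space and afterwards agrees with B. -/
lemma loopA_diff (ch : Char) (t' : List Char) (fuel : Nat)
    (hfuel : 2 * (ch :: t').length + 1 ≤ fuel)
    (hlast2 : isSymO (('=' :: ch :: t').getLast?) = true)
    (hsum : (List.map depth_add ('=' :: ch :: t')).sum ≠ 0) :
    loopA (fuel + 1) ('=' :: ch :: t') 0 0
      = ' ' :: loopB ('=' :: ch :: t') 0 false [] := by
  have hsum' : (List.map depth_add (ch :: t')).sum ≠ 0 := by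
    have h := hsum
    simp only [List.map_cons, List.sum_cons] at h ⊢
    rw [show depth_add '=' = 0 from by decide] at h
    omega
  rw [loopA, if_pos (by simp : (0:Nat) < ('=' :: ch :: t').length)]
  simp only [List.getD_cons_zero]
  rw [if_pos (show (0:Int) + depth_add '=' = 0 ∧ isSym '=' = true from by decide)]
  rw [show ((0:Int) + depth_add '=') = 0 from by decide]
  have hidx : ((((0:Nat)) : Int) - 1) = (-1 : Int) := by norm_num
  rw [hidx, PySem.List.pyGet?_neg_one]
  rw [if_pos (Or.inr hlast2)]
  have hins : string_insert ('=' :: ch :: t') (((0:Nat)) : Int) [' '] = ' ' :: '=' :: ch :: t' := by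
    simpa using insert_append [] ('=' :: ch :: t')
  rw [hins]
  rw [show (' ' :: '=' :: ch :: t') = ([' ', '='] ++ (ch :: t')) by simp]
  have hidx2 : (((0 + 1 : Nat)) : Int) + 1 = ((([' ', '='] : List Char).length : Nat) : Int) := by simp
  rw [hidx2, pyGet?_at_len]
  simp only [List.head?_cons]
  by_cases hch : ch = '='
  · subst hch
    rw [if_neg (by simp)]
    rw [show (0 + 1 + 1 : Nat) = ([' ', '='] : List Char).length by simp]
    have hA := loopA_eq ('=' :: t') fuel [' ', '='] 0 true (by simp at hfuel ⊢; omega)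
      (by
        intro _
        have e : ((([' ', '='] : List Char).length : Nat) : Int) - 1
            = ((([' '] : List Char).length : Nat) : Int) := by simp
        rw [e, show ([' ', '='] : List Char) ++ '=' :: t' = [' '] ++ ('=' :: '=' :: t') by simp,
          pyGet?_at_len]
        simp [isSymO, isSym])
      (by intro _; simpa using hsum')
    rw [hA]
    conv_rhs => rw [loopB]
    simp only [isSym, List.head?_cons]
    norm_num
    have := loopB_prefix ('=' :: t') 0 true [' '] ['=']
    simpa using this
  · rw [if_pos (by simp [hch])]
    rw [insert_append [' ', '='] (ch :: t')]
    obtain ⟨f2, rfl⟩ : ∃ f2, fuel = f2 + 1 := ⟨fuel - 1, by simp at hfuel; omega⟩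
    rw [show (0 + 1 + 1 : Nat) = ([' ', '='] : List Char).length by simp, loopA_space]
    rw [show (([' ', '='] : List Char) ++ [' ']) ++ (ch :: t') = ([' ', '=', ' '] : List Char) ++ (ch :: t') by simp]
    rw [show ([' ', '='] : List Char).length + 1 = ([' ', '=', ' '] : List Char).length by simp]
    have hA := loopA_eq (ch :: t') f2 [' ', '=', ' '] 0 true (by simp at hfuel ⊢; omega)
      (by intro hh; simp at hh; exact absurd hh hch)
      (by intro _; simpa using hsum')
    rw [hA]
    conv_rhs => rw [loopB]
    simp only [isSym, List.head?_cons]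
    norm_num [hch]
    have := loopB_prefix (ch :: t') 0 true [' '] ['=', ' ']
    simpa using this

-- ===== VERDICT (by name: the statement is the Claim_ definition above) =====
theorem pad_symbols_spec : Claim_unchanged_pad_symbols := by
  unfold Claim_unchanged_pad_symbols
  intro s _ hpre
  unfold Spec_pad_symbols
  intro hnd
  unfold pad_symbols pad_symbols_alt
  have h := loopA_eq s.toList (2 * s.toList.length + 1) [] 0 false (by omega) ?_ ?_
  · exact congrArg String.ofList (by simpa using h)
  · intro hh
    rw [show (([] : List Char) ++ s.toList) = s.toList by simp]
    rw [show (((([] : List Char).length : Nat) : Int) - 1) = (-1 : Int) by simp]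
    rw [PySem.List.pyGet?_neg_one]
    unfold D_pad_symbols at hnd
    cases hiso : isSymO s.toList.getLast? with
    | false => rfl
    | true => exact absurd ⟨hh, hiso⟩ hnd
  · intro hl
    simpa using hpre hl

theorem pad_symbols_changed : Claim_changed_pad_symbols := by
  unfold Claim_changed_pad_symbols; decide

theorem pad_symbols_tight : Claim_exact_pad_symbols := by
  unfold Claim_exact_pad_symbols
  intro s _ hpre hd
  obtain ⟨hhead, hlastSym⟩ := hd
  obtain ⟨t, ht⟩ : ∃ t, s.toList = '=' :: t := by
    cases h : s.toList with
    | nil => simp [h] at hhead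
    | cons a t => rw [h] at hhead; simp at hhead; exact ⟨t, by rw [hhead]⟩
  cases t with
  | nil =>
    exfalso
    unfold Pre_pad_symbols at hpre
    rw [ht] at hpre
    exact (hpre (by decide)) (by decide)
  | cons ch t' =>
    have hlast2 : isSymO (('=' :: ch :: t').getLast?) = true := by rw [← ht]; exact hlastSym
    have hsum : (List.map depth_add ('=' :: ch :: t')).sum ≠ 0 := by
      rw [← ht]
      exact hpre (by rw [ht]; exact hlast2)
    intro heq
    unfold pad_symbols pad_symbols_alt at heq
    rw [ht] at heq
    rw [show 2 * ('=' :: ch :: t').length + 1 = (2 * (ch :: t').length + 2) + 1 by simp; ring] at heq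
    rw [loopA_diff ch t' _ (by omega) hlast2 hsum] at heq
    have h2 := congrArg String.toList heq
    simp only [String.toList_ofList] at h2
    exact List.cons_ne_self _ _ h2
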